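-- pv_equiv track=rewrite | github.com/bluekms/PythonStudy | Programmers/Lv1 옹알이2.py | Check
-- ===== SOURCE A (Python) =====
-- words = ["aya", "ye", "woo", "ma"]
--
-- def Check(b, before):
--     if b == "":
--         return True
--     for w in words:
--         if w == before:
--             continue
--         else:
--             if b[0:len(w)] == w:
--                 return Check(b[len(w):len(b)], w)
--     return False
-- ===== SOURCE B (Python) =====
-- # Dispatch on the first character: the four words start with pairwise distinct
-- # letters, so at most one word can ever match at a position.
-- FIRST = {"a": "aya", "y": "ye", "w": "woo", "m": "ma"}
--
-- def Check(b, before):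
--     pos = 0
--     while pos < len(b):
--         w = FIRST.get(b[pos])
--         if w is None or w == before or b[pos:pos + len(w)] != w:
--             return False
--         pos += len(w)
--         before = w
--     return True
-- ===== Notes on version B (the rewrite author's own statement) =====
-- stated objective: alternative
-- what changed: Replaced A's committed recursion that scans the word list at every step with an iterative index loop that dispatches on the current character via a first-letter table (the four words start with pairwise distinct letters), so the inner scan over words disappears.
import Mathlib
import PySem

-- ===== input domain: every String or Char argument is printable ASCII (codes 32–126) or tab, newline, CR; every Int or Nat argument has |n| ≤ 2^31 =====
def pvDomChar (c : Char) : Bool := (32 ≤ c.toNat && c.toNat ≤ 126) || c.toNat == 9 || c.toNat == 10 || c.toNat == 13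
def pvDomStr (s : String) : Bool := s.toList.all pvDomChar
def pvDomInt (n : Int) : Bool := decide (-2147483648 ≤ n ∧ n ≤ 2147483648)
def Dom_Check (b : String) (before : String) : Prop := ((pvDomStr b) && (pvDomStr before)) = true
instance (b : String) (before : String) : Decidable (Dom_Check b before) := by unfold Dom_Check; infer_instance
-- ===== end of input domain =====

-- ===== PORT A =====
-- B replaces A's scan over `words` with a first-character dispatch table (the four words
-- start with pairwise distinct letters) and an index loop instead of recursion (alternative).
-- Both ports use a fuel counter of b.length + 1 purely as a totality guard: every
-- committed step consumes at least 2 characters, so the fuel is never exhausted.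
def wordsA : List (List Char) := ["aya".toList, "ye".toList, "woo".toList, "ma".toList]

-- A's recursion: first word ≠ before whose length-prefix of b matches; commit, recurse on the sliced tail
def checkARec : Nat → List Char → List Char → Bool
  | 0, _, _ => true
  | fuel + 1, b, before =>
    if b = [] then true
    else
      match wordsA.find? (fun w => !(w == before) && (b.take w.length == w)) with
      | none => false
      | some w => checkARec fuel (b.drop w.length) w

def Check (b : String) (before : String) : Bool :=
  checkARec (b.toList.length + 1) b.toList before.toList

-- ===== PORT B =====
-- FIRST.get(c): the dispatch table keyed by the first character
def firstWord (c : Char) : Option (List Char) :=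
  if c = 'a' then some "aya".toList
  else if c = 'y' then some "ye".toList
  else if c = 'w' then some "woo".toList
  else if c = 'm' then some "ma".toList
  else none

-- B's while loop: pos advances over the fixed character list; one table lookup per step
def checkBLoop : Nat → List Char → Nat → List Char → Bool
  | 0, _, _, _ => true
  | fuel + 1, bs, pos, before =>
    if h : pos < bs.length then
      match firstWord bs[pos] with
      | none => false
      | some w =>
        if w == before || !((bs.drop pos).take w.length == w) then false
        else checkBLoop fuel bs (pos + w.length) w
    else true

def Check_alt (b : String) (before : String) : Bool :=
  checkBLoop (b.toList.length + 1) b.toList 0 before.toList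

-- ===== PRECONDITION & SPEC =====
def Spec_Check (b : String) (before : String) (out : Bool) : Prop := out = Check_alt b before
instance (b : String) (before : String) (out : Bool) : Decidable (Spec_Check b before out) := by unfold Spec_Check; infer_instance

-- ===== CLAIM =====
def Claim_equal_Check : Prop := ∀ (b : String) (before : String), Dom_Check b before → Spec_Check b before (Check b before)

-- ===== LEMMAS AND PROOFS =====

-- One step of A's word scan equals one dispatch-table step of B (first chars are pairwise distinct).
lemma step_eq (c : Char) (rest before : List Char) :
    wordsA.find? (fun w => !(w == before) && ((c :: rest).take w.length == w)) =
      (match firstWord c with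
       | none => none
       | some w =>
         if w == before || !((c :: rest).take w.length == w) then none else some w) := by
  by_cases ha : c = 'a'
  · subst ha
    cases h1 : (['a','y','a'] == before) <;> cases h2 : (rest.take 2 == ['y','a']) <;>
      simp [wordsA, List.find?, firstWord, h1, h2]
  · by_cases hy : c = 'y'
    · subst hy
      cases h1 : (['y','e'] == before) <;> cases h2 : (rest.take 1 == ['e']) <;>
        simp [wordsA, List.find?, firstWord, h1, h2]
    · by_cases hw : c = 'w'
      · subst hw
        cases h1 : (['w','o','o'] == before) <;> cases h2 : (rest.take 2 == ['o','o']) <;>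
          simp [wordsA, List.find?, firstWord, h1, h2]
      · by_cases hm : c = 'm'
        · subst hm
          cases h1 : (['m','a'] == before) <;> cases h2 : (rest.take 1 == ['a']) <;>
            simp [wordsA, List.find?, firstWord, h1, h2]
        · have ha' : (c == 'a') = false := by simp [ha]
          have hy' : (c == 'y') = false := by simp [hy]
          have hw' : (c == 'w') = false := by simp [hw]
          have hm' : (c == 'm') = false := by simp [hm]
          simp [wordsA, List.find?, firstWord, ha, hy, hw, hm, ha', hy', hw', hm']

-- With equal fuel, B's index loop tracks A's recursion on the dropped suffix exactly.
lemma key (n : Nat) : ∀ (bs : List Char) (pos : Nat) (before : List Char),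
    checkBLoop n bs pos before = checkARec n (bs.drop pos) before := by
  induction n with
  | zero => intro bs pos before; rfl
  | succ n ih =>
    intro bs pos before
    by_cases hlt : pos < bs.length
    · have hcons : bs.drop pos = bs[pos] :: bs.drop (pos + 1) :=
        List.drop_eq_getElem_cons hlt
      have hne : bs.drop pos ≠ [] := by simp [List.drop_eq_nil_iff]; omega
      rw [checkBLoop, checkARec]
      simp only [hlt, dif_pos, hne, if_neg, not_false_iff]
      rw [hcons, step_eq, ← hcons]
      cases hfw : firstWord bs[pos] with
      | none => rfl
      | some w =>
        simp only
        by_cases hcond : (w == before || !((bs.drop pos).take w.length == w)) = true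
        · simp [hcond]
        · simp only [hcond, ih bs (pos + w.length) w, List.drop_drop]
          simp
    · have hge : bs.length ≤ pos := by omega
      rw [checkBLoop, checkARec]
      simp [List.drop_eq_nil_of_le hge, Nat.not_lt.mpr hge]

-- ===== VERDICT =====
theorem Check_spec : Claim_equal_Check := by
  intro b before _
  unfold Spec_Check Check Check_alt
  rw [key (b.toList.length + 1) b.toList 0 before.toList]
  rfl
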